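-- pv_equiv track=rewrite | github.com/Ki11ay/IEEEXTreme | double.py | is_it_valid
-- ===== SOURCE A (Python) =====
-- def is_it_valid(sequence, N):
--     for i in range(1, N + 1):
--         if sequence.count(i) != 2:
--             return False
--         left = sequence.index(i)
--         right = len(sequence) - 1 - sequence[::-1].index(i)
--         if right - left != i:
--             return False
--     return True
-- ===== SOURCE B (Python) =====
-- def is_it_valid(sequence, N):
--     pairs = sorted((v, p) for p, v in enumerate(sequence) if 1 <= v <= N)
--     i = 1
--     while len(pairs) >= 2:
--         (v1, p1), (v2, p2) = pairs[0], pairs[1]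
--         if v1 != i or v2 != i or p2 - p1 != i:
--             return False
--         pairs = pairs[2:]
--         i += 1
--     return not pairs and i > N
-- ===== Notes on version B (the rewrite author's own statement) =====
-- stated objective: alternative
-- what changed: Replaces A's per-i rescans of the list (count, index and reversed-index for every i in 1..N) with a sort-then-scan: build the (value, position) pairs of in-range values once, sort them lexicographically, and verify the sorted list two pairs at a time in a single sweep; on inputs with many invalid values A exits early, so no speed-up was measured.
import Mathlib
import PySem

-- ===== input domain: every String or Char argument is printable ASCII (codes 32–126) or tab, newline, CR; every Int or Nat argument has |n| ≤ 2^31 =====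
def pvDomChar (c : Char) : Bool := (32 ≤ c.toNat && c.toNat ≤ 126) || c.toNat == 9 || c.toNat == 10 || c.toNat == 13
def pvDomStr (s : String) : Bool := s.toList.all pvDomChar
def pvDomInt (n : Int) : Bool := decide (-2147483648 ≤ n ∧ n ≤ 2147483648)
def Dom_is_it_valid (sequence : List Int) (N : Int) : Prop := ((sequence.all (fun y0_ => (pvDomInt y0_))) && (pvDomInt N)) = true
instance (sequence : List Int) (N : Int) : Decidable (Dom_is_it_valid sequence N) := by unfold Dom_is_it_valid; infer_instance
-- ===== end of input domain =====

-- B replaces A's per-i list scans (count, index, reversed index for every i in 1..N) by a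
-- sort-then-scan: sort the (value, position) pairs of in-range values once, then verify the
-- sorted list two pairs at a time in one sweep; objective: alternative algorithm.

-- ===== PORT A =====
def is_it_valid (sequence : List Int) (N : Int) : Bool :=
  (PySem.List.pyRange 1 (N + 1) 1).all (fun i =>
    if PySem.List.count sequence i ≠ 2 then false
    else
      match PySem.List.slice? sequence none none (-1) with
      | none => false   -- unreachable: step -1 ≠ 0
      | some rev =>
        match PySem.List.index? sequence i, PySem.List.index? rev i with
        | some left, some ridx =>
            decide ((((sequence.length : Int) - 1 - (ridx : Int)) - (left : Int)) = i)
        | _, _ => false)   -- unreachable: count = 2 → i ∈ sequence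

-- ===== PORT B =====
-- the sorted comprehension: sorted((v, p) for p, v in enumerate(sequence) if 1 <= v <= N)
def pvPairs (sequence : List Int) (N : Int) : List (Int × Int) :=
  (PySem.List.enumerate sequence 0).filterMap
    (fun q => if 1 ≤ q.2 ∧ q.2 ≤ N then some (q.2, q.1) else none)

-- the while-loop: consume two pairs at a time, checking value i twice and distance i
def pvScan (N : Int) : Int → List (Int × Int) → Bool
  | i, [] => decide (N < i)
  | _, [_] => false
  | i, (v1, p1) :: (v2, p2) :: rest =>
      if v1 ≠ i ∨ v2 ≠ i ∨ p2 - p1 ≠ i then false else pvScan N (i + 1) rest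

def is_it_valid_alt (sequence : List Int) (N : Int) : Bool :=
  pvScan N 1 (PySem.List.sorted2 (pvPairs sequence N) (fun t => t.1) (fun t => t.2))

-- ===== PRECONDITION & SPEC =====
def Spec_is_it_valid (sequence : List Int) (N : Int) (out : Bool) : Prop := out = is_it_valid_alt sequence N
instance (sequence : List Int) (N : Int) (out : Bool) : Decidable (Spec_is_it_valid sequence N out) := by unfold Spec_is_it_valid; infer_instance

-- ===== CLAIM (what is proved, stated in full; the proofs are below) =====
def Claim_equal_is_it_valid : Prop := ∀ (sequence : List Int) (N : Int), Dom_is_it_valid sequence N → Spec_is_it_valid sequence N (is_it_valid sequence N)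

-- ===== LEMMAS AND PROOFS =====

def pvPos (s : List Int) (j : Int) : List Int :=
  (PySem.List.enumerate s 0).filterMap (fun q => if q.2 = j then some q.1 else none)
def pvBlock (s : List Int) (j : Int) : List (Int × Int) := (pvPos s j).map (fun p => (j, p))

theorem pvPos_append (s : List Int) (x j : Int) :
    pvPos (s ++ [x]) j = pvPos s j ++ (if x = j then [(s.length : Int)] else []) := by
  unfold pvPos
  rw [PySem.List.enumerate_append, List.filterMap_append]
  simp only [PySem.List.enumerate_cons, PySem.List.enumerate_nil]
  by_cases h : x = j <;> simp [List.filterMap, h]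

theorem pvPos_pairwise (s : List Int) (j : Int) : (pvPos s j).Pairwise (· < ·) := by
  unfold pvPos
  refine List.Pairwise.filterMap _ ?_ (PySem.List.pairwise_lt_enumerate s 0)
  intro a a' hlt b hb b' hb'
  by_cases h : a.2 = j <;> by_cases h' : a'.2 = j <;>
    simp [h, h'] at hb hb' <;> omega

def pvLt (a b : Int × Int) : Prop := a.1 < b.1 ∨ (a.1 = b.1 ∧ a.2 < b.2)
def pvLe (a b : Int × Int) : Prop := a.1 < b.1 ∨ (a.1 = b.1 ∧ a.2 ≤ b.2)

theorem pvPairs_append (s : List Int) (x N : Int) :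
    pvPairs (s ++ [x]) N = pvPairs s N ++ (if 1 ≤ x ∧ x ≤ N then [(x, (s.length : Int))] else []) := by
  unfold pvPairs
  rw [PySem.List.enumerate_append, List.filterMap_append]
  simp only [PySem.List.enumerate_cons, PySem.List.enumerate_nil]
  by_cases h : 1 ≤ x ∧ x ≤ N <;> simp [List.filterMap, h]

theorem pvPos_length (s : List Int) (j : Int) : (pvPos s j).length = s.count j := by
  induction s using List.reverseRecOn with
  | nil => rfl
  | append_singleton s x ih =>
      rw [pvPos_append, List.length_append, ih, List.count_append]
      by_cases h : x = j <;> simp [h]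

theorem pvScan_head_ne (N i : Int) (q : Int × Int) (t : List (Int × Int)) (h : q.1 ≠ i) :
    pvScan N i (q :: t) = false := by
  match t with
  | [] => rfl
  | q2 :: t => simp [pvScan]; intro hv; exact absurd hv h

theorem pvBlock_fst (s : List Int) (j : Int) (q : Int × Int) (h : q ∈ pvBlock s j) : q.1 = j := by
  unfold pvBlock at h
  obtain ⟨p, _, rfl⟩ := List.mem_map.mp h
  rfl

theorem pvFlatMap_append_perm {α : Type} (l : List α) (f g : α → List (Int × Int)) :
    (l.flatMap (fun i => f i ++ g i)).Perm (l.flatMap f ++ l.flatMap g) := by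
  induction l with
  | nil => simp
  | cons a l ih =>
      simp only [List.flatMap_cons]
      refine ((List.Perm.append_left _ ih).trans ?_)
      have h1 : (g a ++ (l.flatMap f ++ l.flatMap g)).Perm (l.flatMap f ++ (g a ++ l.flatMap g)) := by
        rw [← List.append_assoc, ← List.append_assoc]
        exact List.Perm.append_right _ List.perm_append_comm
      rw [List.append_assoc, List.append_assoc]
      exact List.Perm.append_left _ h1

theorem pvFlatMap_single (x p : Int) :
    ∀ (l : List Int), l.Nodup →
      (l.flatMap (fun j => if x = j then [(j, p)] else [])) = if x ∈ l then [(x, p)] else [] := by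
  intro l
  induction l with
  | nil => simp
  | cons a l ih =>
      intro hnd
      rw [List.nodup_cons] at hnd
      simp only [List.flatMap_cons, ih hnd.2]
      by_cases h : x = a
      · subst h
        simp [hnd.1]
      · by_cases h2 : x ∈ l <;> simp [h, h2]

theorem pvBlocks_pairwise (s : List Int) :
    ∀ (l : List Int), l.Pairwise (· < ·) → (l.flatMap (pvBlock s)).Pairwise pvLt := by
  intro l
  induction l with
  | nil => simp
  | cons a l ih =>
      intro hp
      rw [List.pairwise_cons] at hp
      rw [List.flatMap_cons, List.pairwise_append]
      refine ⟨?_, ih hp.2, ?_⟩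
      · unfold pvBlock
        rw [List.pairwise_map]
        exact (pvPos_pairwise s a).imp (fun h => Or.inr ⟨rfl, h⟩)
      · intro u hu w hw
        obtain ⟨j, hj, hwj⟩ := List.mem_flatMap.mp hw
        have h1 := pvBlock_fst s a u hu
        have h2 := pvBlock_fst s j w hwj
        exact Or.inl (by rw [h1, h2]; exact hp.1 j hj)

theorem pvBlocks_perm (s : List Int) (N : Int) :
    ((PySem.List.pyRange 1 (N + 1) 1).flatMap (pvBlock s)).Perm (pvPairs s N) := by
  induction s using List.reverseRecOn with
  | nil =>
      simp [pvBlock, pvPos, pvPairs, PySem.List.enumerate_nil]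
  | append_singleton s x ih =>
      have hb : (PySem.List.pyRange 1 (N + 1) 1).flatMap (pvBlock (s ++ [x])) =
          (PySem.List.pyRange 1 (N + 1) 1).flatMap
            (fun j => pvBlock s j ++ (if x = j then [(j, (s.length : Int))] else [])) := by
        refine List.flatMap_congr ?_
        intro j _
        unfold pvBlock
        rw [pvPos_append]
        by_cases h : x = j <;> simp [h]
      rw [hb, pvPairs_append]
      refine (pvFlatMap_append_perm _ _ _).trans ?_
      rw [pvFlatMap_single x (s.length : Int) _ (PySem.List.nodup_pyRange_one 1 (N + 1))]
      have hiff : (x ∈ PySem.List.pyRange 1 (N + 1) 1) ↔ (1 ≤ x ∧ x ≤ N) := by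
        rw [PySem.List.mem_pyRange_one]; omega
      have : (if x ∈ PySem.List.pyRange 1 (N + 1) 1 then [(x, (s.length : Int))] else []) =
          (if 1 ≤ x ∧ x ≤ N then [(x, (s.length : Int))] else []) := by
        by_cases h : 1 ≤ x ∧ x ≤ N <;> simp [h, hiff]
      rw [this]
      exact List.Perm.append ih (List.Perm.refl _)

theorem pvPos_nil_iff (s : List Int) (j : Int) : pvPos s j = [] ↔ j ∉ s := by
  rw [← List.count_eq_zero, ← pvPos_length, List.length_eq_zero_iff]

theorem pvPos_head? (s : List Int) (j : Int) :
    (pvPos s j).head? = (PySem.List.index? s j).map (fun n => (n : Int)) := by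
  induction s using List.reverseRecOn with
  | nil => simp [pvPos, PySem.List.enumerate_nil, PySem.List.index?_eq_idxOf?]
  | append_singleton s x ih =>
      rw [pvPos_append]
      by_cases hm : j ∈ s
      · have hne : pvPos s j ≠ [] := fun h => ((pvPos_nil_iff s j).mp h) hm
        rw [PySem.List.index?_append_of_mem _ hm, List.head?_append_of_ne_nil _ hne]
        exact ih
      · have hnil : pvPos s j = [] := (pvPos_nil_iff s j).mpr hm
        rw [hnil, List.nil_append]
        by_cases hx : x = j
        · subst hx
          rw [PySem.List.index?_append_singleton_self s x hm]
          simp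
        · have : j ∉ s ++ [x] := by simp [hm]; exact fun h => hx h.symm
          rw [(PySem.List.index?_eq_none_iff _ j).mpr this]
          simp [hx]

theorem pvPos_getLast? (s : List Int) (j : Int) :
    (pvPos s j).getLast? = (PySem.List.index? s.reverse j).map
      (fun r => (s.length : Int) - 1 - (r : Int)) := by
  induction s using List.reverseRecOn with
  | nil => simp [pvPos, PySem.List.enumerate_nil, PySem.List.index?_eq_idxOf?]
  | append_singleton s x ih =>
      rw [pvPos_append]
      have hrev : (s ++ [x]).reverse = x :: s.reverse := by simp
      by_cases hx : x = j
      · subst hx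
        rw [hrev, PySem.List.index?_cons_self]
        simp
      · have h1 : PySem.List.index? (s ++ [x]).reverse j =
            (PySem.List.index? s.reverse j).map (· + 1) := by
          rw [hrev, PySem.List.index?_cons_of_ne s.reverse hx]
        rw [h1, if_neg hx, List.append_nil]
        rw [ih]
        cases h : PySem.List.index? s.reverse j with
        | none => simp
        | some r =>
            simp only [Option.map_some]
            refine congrArg some ?_
            simp
            ring

def pvCondB (s : List Int) (j : Int) : Bool :=
  match pvPos s j with
  | [a, b] => decide (b - a = j)
  | _ => false

theorem pvPred_eq (s : List Int) (i : Int) :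
    (if PySem.List.count s i ≠ 2 then false
     else
      match PySem.List.slice? s none none (-1) with
      | none => false
      | some rev =>
        match PySem.List.index? s i, PySem.List.index? rev i with
        | some left, some ridx =>
            decide ((((s.length : Int) - 1 - (ridx : Int)) - (left : Int)) = i)
        | _, _ => false) = pvCondB s i := by
  rw [PySem.List.slice?_none_none_neg_one]
  by_cases hc : PySem.List.count s i = 2
  · have hc' : s.count i = 2 := by rwa [PySem.List.count_eq] at hc
    have hm : i ∈ s := by
      rw [← List.count_pos_iff]; omega
    obtain ⟨f, hf⟩ := Option.isSome_iff_exists.mp ((PySem.List.index?_isSome_iff s i).mpr hm)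
    obtain ⟨r, hr⟩ := Option.isSome_iff_exists.mp
      ((PySem.List.index?_isSome_iff s.reverse i).mpr (List.mem_reverse.mpr hm))
    have hlen : (pvPos s i).length = 2 := by rw [pvPos_length, hc']
    obtain ⟨a, b, hab⟩ := List.length_eq_two.mp hlen
    have ha : a = (f : Int) := by
      have := pvPos_head? s i
      rw [hab, hf] at this
      simpa using this
    have hb : b = (s.length : Int) - 1 - (r : Int) := by
      have := pvPos_getLast? s i
      rw [hab, hr] at this
      simpa using this
    rw [if_neg (not_not.mpr hc)]
    simp only [hf, hr]
    unfold pvCondB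
    rw [hab, ha, hb]
  · rw [if_pos hc]
    have hc' : s.count i ≠ 2 := by rwa [PySem.List.count_eq] at hc
    have hlen : (pvPos s i).length ≠ 2 := by rw [pvPos_length]; exact hc'
    unfold pvCondB
    rcases hp : pvPos s i with _ | ⟨a, _ | ⟨b, _ | ⟨c, t⟩⟩⟩ <;> simp_all

theorem pvScan_flatMap (s : List Int) (N : Int) :
    ∀ (k : Nat) (i : Int), (N + 1 - i).toNat = k →
      pvScan N i ((PySem.List.pyRange i (N + 1) 1).flatMap (pvBlock s)) =
        (PySem.List.pyRange i (N + 1) 1).all (pvCondB s) := by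
  intro k
  induction k with
  | zero =>
      intro i hk
      rw [PySem.List.pyRange_one_eq_nil (by omega)]
      simp [pvScan]
      omega
  | succ k ih =>
      intro i hk
      have hiN : i < N + 1 := by omega
      rw [PySem.List.pyRange_one_cons hiN, List.flatMap_cons, List.all_cons]
      have hqne : ∀ q ∈ (PySem.List.pyRange (i + 1) (N + 1) 1).flatMap (pvBlock s), q.1 ≠ i := by
        intro q hq
        obtain ⟨j, hj, hqj⟩ := List.mem_flatMap.mp hq
        have h1 := pvBlock_fst s j q hqj
        have h2 := PySem.List.mem_pyRange_one.mp hj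
        omega
      have hblock : pvBlock s i = (pvPos s i).map (fun p => (i, p)) := rfl
      rcases hp : pvPos s i with _ | ⟨p1, _ | ⟨p2, _ | ⟨p3, t3⟩⟩⟩
      · have hcond : pvCondB s i = false := by simp [pvCondB, hp]
        rw [hblock, hp, hcond]
        simp only [List.map_nil, List.nil_append, Bool.false_and]
        cases hrest : (PySem.List.pyRange (i + 1) (N + 1) 1).flatMap (pvBlock s) with
        | nil => simp [pvScan]; omega
        | cons q t =>
            exact pvScan_head_ne N i q t (hqne q (by rw [hrest]; exact List.mem_cons_self))
      · have hcond : pvCondB s i = false := by simp [pvCondB, hp]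
        rw [hblock, hp, hcond]
        simp only [List.map_cons, List.map_nil, List.cons_append, List.nil_append, Bool.false_and]
        cases hrest : (PySem.List.pyRange (i + 1) (N + 1) 1).flatMap (pvBlock s) with
        | nil => rfl
        | cons q t =>
            have hq := hqne q (by rw [hrest]; exact List.mem_cons_self)
            obtain ⟨q1, q2⟩ := q
            have hq' : q1 ≠ i := hq
            simp [pvScan, hq']
      · rw [hblock, hp]
        simp only [List.map_cons, List.map_nil, List.cons_append, List.nil_append]
        by_cases hd : p2 - p1 = i
        · have hcond : pvCondB s i = true := by simp [pvCondB, hp, hd]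
          rw [hcond]
          simp only [Bool.true_and]
          have : pvScan N i ((i, p1) :: (i, p2) ::
              (PySem.List.pyRange (i + 1) (N + 1) 1).flatMap (pvBlock s)) =
              pvScan N (i + 1) ((PySem.List.pyRange (i + 1) (N + 1) 1).flatMap (pvBlock s)) := by
            simp [pvScan, hd]
          rw [this, ih (i + 1) (by omega)]
        · have hcond : pvCondB s i = false := by simp [pvCondB, hp, hd]
          rw [hcond]
          simp [pvScan, hd]
      · have hcond : pvCondB s i = false := by simp [pvCondB, hp]
        rw [hcond]
        simp only [Bool.false_and]
        rw [hblock, hp]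
        simp only [List.map_cons, List.cons_append]
        by_cases hd : p2 - p1 = i
        · have : pvScan N i ((i, p1) :: (i, p2) :: (i, p3) :: (t3.map (fun p => (i, p)) ++
              (PySem.List.pyRange (i + 1) (N + 1) 1).flatMap (pvBlock s))) =
              pvScan N (i + 1) ((i, p3) :: (t3.map (fun p => (i, p)) ++
              (PySem.List.pyRange (i + 1) (N + 1) 1).flatMap (pvBlock s))) := by
            simp [pvScan, hd]
          rw [this]
          exact pvScan_head_ne N (i + 1) _ _ (by simp)
        · simp [pvScan, hd]

def pvLtB (a b : Int × Int) : Bool :=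
  decide (a.1 < b.1) || (!decide (b.1 < a.1) && decide (a.2 < b.2))

theorem pvLtB_true_iff (a b : Int × Int) : pvLtB a b = true ↔ pvLt a b := by
  simp [pvLtB, pvLt]; omega

theorem pvLtB_false_iff (a b : Int × Int) : pvLtB a b = false ↔ pvLe b a := by
  simp [pvLtB, pvLe]; omega

theorem pvLt_le (a b : Int × Int) (h : pvLt a b) : pvLe a b := by
  unfold pvLt at h; unfold pvLe; omega

theorem pvLe_trans (a b c : Int × Int) (h1 : pvLe a b) (h2 : pvLe b c) : pvLe a c := by
  unfold pvLe at *; omega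

theorem pvLe_antisymm (a b : Int × Int) (h1 : pvLe a b) (h2 : pvLe b a) : a = b := by
  unfold pvLe at *
  refine Prod.ext ?_ ?_ <;> omega

theorem pvInsertBy_pairwise (x : Int × Int) (ys : List (Int × Int)) (h : ys.Pairwise pvLe) :
    (PySem.List.insertBy pvLtB x ys).Pairwise pvLe := by
  induction ys with
  | nil => simp [PySem.List.insertBy]
  | cons y ys ih =>
      rw [List.pairwise_cons] at h
      show (if pvLtB x y then x :: y :: ys else y :: PySem.List.insertBy pvLtB x ys).Pairwise pvLe
      by_cases hb : pvLtB x y = true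
      · rw [if_pos hb]
        have hxy : pvLe x y := pvLt_le _ _ ((pvLtB_true_iff x y).mp hb)
        refine List.Pairwise.cons ?_ (List.Pairwise.cons h.1 h.2)
        intro z hz
        rcases List.mem_cons.mp hz with rfl | hz'
        · exact hxy
        · exact pvLe_trans _ _ _ hxy (h.1 z hz')
      · rw [if_neg hb]
        have hyx : pvLe y x := (pvLtB_false_iff x y).mp (Bool.not_eq_true _ ▸ (by simpa using hb))
        refine List.Pairwise.cons ?_ (ih h.2)
        intro z hz
        rcases (PySem.List.insertBy_mem_iff _ _ _ _).mp hz with rfl | hz'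
        · exact hyx
        · exact h.1 z hz'

theorem pvPerm_pairwise_eq :
    ∀ (l₁ l₂ : List (Int × Int)), l₁.Perm l₂ → l₁.Pairwise pvLe → l₂.Pairwise pvLe → l₁ = l₂ := by
  intro l₁
  induction l₁ with
  | nil =>
      intro l₂ hp _ _
      exact (List.Perm.nil_eq hp).symm ▸ rfl
  | cons h t ih =>
      intro l₂ hp hp1 hp2
      cases l₂ with
      | nil => exact absurd hp.symm (by simp)
      | cons h₂ t₂ =>
          rw [List.pairwise_cons] at hp1 hp2
          by_cases he : h = h₂
          · subst he
            rw [ih t₂ (hp.cons_inv) hp1.2 hp2.2]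
          · have hmem : h ∈ h₂ :: t₂ := hp.mem_iff.mp List.mem_cons_self
            have hmem2 : h₂ ∈ h :: t := hp.symm.mem_iff.mp List.mem_cons_self
            have h1 : pvLe h₂ h := hp2.1 h (by rcases List.mem_cons.mp hmem with rfl | hh; exact absurd rfl he; exact hh)
            have h2 : pvLe h h₂ := hp1.1 h₂ (by rcases List.mem_cons.mp hmem2 with rfl | hh; exact absurd rfl (fun hhh => he hhh.symm); exact hh)
            exact absurd (pvLe_antisymm _ _ h2 h1) he

theorem pvFoldl_pairwise (xs : List (Int × Int)) :
    ∀ acc : List (Int × Int), acc.Pairwise pvLe →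
      (xs.foldl (fun acc x => PySem.List.insertBy pvLtB x acc) acc).Pairwise pvLe := by
  induction xs with
  | nil => intro acc h; exact h
  | cons x xs ih =>
      intro acc h
      exact ih _ (pvInsertBy_pairwise x acc h)

theorem pvSorted2_eq (xs ys : List (Int × Int)) (hp : ys.Perm xs) (hlt : ys.Pairwise pvLt) :
    PySem.List.sorted2 xs (fun t => t.1) (fun t => t.2) = ys := by
  have hfold : PySem.List.sorted2 xs (fun t => t.1) (fun t => t.2) =
      xs.foldl (fun acc x => PySem.List.insertBy pvLtB x acc) [] := rfl
  have hperm : (PySem.List.sorted2 xs (fun t => t.1) (fun t => t.2)).Perm ys :=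
    (PySem.List.sorted2_perm xs _ _ false).trans hp.symm
  have hpw : (PySem.List.sorted2 xs (fun t => t.1) (fun t => t.2)).Pairwise pvLe := by
    rw [hfold]
    exact pvFoldl_pairwise xs [] (by simp)
  exact pvPerm_pairwise_eq _ _ hperm hpw (hlt.imp (pvLt_le _ _))

-- ===== VERDICT (by name: the statement is the Claim_ definition above) =====
theorem is_it_valid_spec : Claim_equal_is_it_valid := by
  intro sequence N _
  unfold Spec_is_it_valid is_it_valid is_it_valid_alt
  rw [pvSorted2_eq (pvPairs sequence N) ((PySem.List.pyRange 1 (N + 1) 1).flatMap (pvBlock sequence))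
        (pvBlocks_perm sequence N)
        (pvBlocks_pairwise sequence _ (PySem.List.pairwise_lt_pyRange_one 1 (N + 1))),
      pvScan_flatMap sequence N (N + 1 - 1).toNat 1 rfl]
  exact congrArg _ (funext fun i => pvPred_eq sequence i)
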